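-- pv_equiv track=rewrite | github.com/dataengineerone/youtube-slides | src/youtube_slides/nodes/subtitles.py | _parse_subtitles
-- ===== SOURCE A (Python) =====
-- def _parse_subtitles(subtitles: str):
--     timings = {}
--     last_was_timing = False
--     timing = None
--     last_saved_line = None
--     for l in subtitles.split("\n"):
--         if "-->" in l:
--             timing = l.split(" --> ")[0]
--             last_was_timing = True
--         elif last_was_timing:
--             if last_saved_line != l:
--                 timings[timing] = l
--                 last_saved_line = l
--             last_was_timing = False
--     return timings
-- ===== SOURCE B (Python) =====
-- def _parse_subtitles(subtitles: str):
--     timings = {}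
--     last_saved = None
--     lines = subtitles.split("\n")
--     for prev, cur in zip(lines, lines[1:]):
--         if "-->" in prev and "-->" not in cur:
--             if last_saved != cur:
--                 timings[prev.split(" --> ")[0]] = cur
--                 last_saved = cur
--     return timings
-- ===== Notes on version B (the rewrite author's own statement) =====
-- stated objective: simpler
-- what changed: Replaces A's last_was_timing/timing state-machine flags with a single pass over adjacent line pairs zip(lines, lines[1:]), inspecting each line's predecessor directly and keeping only a last_saved dedup variable.
import Mathlib
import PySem

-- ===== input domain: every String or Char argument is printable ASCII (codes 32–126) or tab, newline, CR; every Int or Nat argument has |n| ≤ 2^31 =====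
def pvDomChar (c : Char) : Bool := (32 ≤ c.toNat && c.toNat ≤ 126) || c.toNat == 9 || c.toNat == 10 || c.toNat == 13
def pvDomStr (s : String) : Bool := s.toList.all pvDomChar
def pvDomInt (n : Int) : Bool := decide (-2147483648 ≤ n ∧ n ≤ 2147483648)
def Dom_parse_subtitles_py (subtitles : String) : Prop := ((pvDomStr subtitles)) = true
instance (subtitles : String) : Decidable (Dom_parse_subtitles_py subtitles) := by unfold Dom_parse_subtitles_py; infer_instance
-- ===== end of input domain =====

-- B replaces A's last_was_timing/timing state-machine flags by a single pass over adjacent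
-- line pairs (zip(lines, lines[1:])), inspecting the predecessor directly: objective = simpler.

-- s.split(sep) for a NONEMPTY literal sep (used by both ports): Python never raises here,
-- so PySem.Str.split? is always some and the [] default is never taken.
def pvSplit (s sep : String) : List String := (PySem.Str.split? s sep).getD []

-- ===== PORT A =====
-- state: (timings, last_was_timing, timing, last_saved_line); timing is Option String
-- (Python's None initial value); when last_was_timing is true, timing is always some _,
-- so '.getD ""' at the insert is never the default.
def pvAStep (st : PySem.Dict String String × Bool × Option String × Option String)
    (l : String) : PySem.Dict String String × Bool × Option String × Option String :=
  if PySem.Str.isIn "-->" l then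
    (st.1, true, some ((pvSplit l " --> ").headD ""), st.2.2.2)
  else if st.2.1 then
    if st.2.2.2 ≠ some l then
      (st.1.insert (st.2.2.1.getD "") l, false, st.2.2.1, some l)
    else
      (st.1, false, st.2.2.1, st.2.2.2)
  else st

def parse_subtitles_py (subtitles : String) : List (String × String) :=
  ((pvSplit subtitles "\n").foldl pvAStep (PySem.Dict.empty, false, none, none)).1.items

-- ===== PORT B =====
-- state: (timings, last_saved); one step per adjacent pair (prev, cur)
def pvBStep (st : PySem.Dict String String × Option String)
    (pc : String × String) : PySem.Dict String String × Option String :=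
  if PySem.Str.isIn "-->" pc.1 && !(PySem.Str.isIn "-->" pc.2) then
    if st.2 ≠ some pc.2 then
      (st.1.insert ((pvSplit pc.1 " --> ").headD "") pc.2, some pc.2)
    else st
  else st

def parse_subtitles_py_alt (subtitles : String) : List (String × String) :=
  let lines := pvSplit subtitles "\n"
  ((lines.zip lines.tail).foldl pvBStep (PySem.Dict.empty, none)).1.items

-- ===== PRECONDITION & SPEC =====
def Spec_parse_subtitles_py (subtitles : String) (out : List (String × String)) : Prop := out = parse_subtitles_py_alt subtitles
instance (subtitles : String) (out : List (String × String)) : Decidable (Spec_parse_subtitles_py subtitles out) := by unfold Spec_parse_subtitles_py; infer_instance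

-- ===== CLAIM (what is proved, stated in full; the proofs are below) =====
def Claim_equal_parse_subtitles_py : Prop := ∀ (subtitles : String), Dom_parse_subtitles_py subtitles → Spec_parse_subtitles_py subtitles (parse_subtitles_py subtitles)

-- ===== LEMMAS AND PROOFS =====

-- Invariant: walking the remaining lines with A's state machine, where p is the line just
-- processed, equals walking the adjacent pairs with B.  The hypothesis captures exactly what
-- A guarantees: if p was a timing line, timing holds its split; otherwise timing is unused.
theorem pv_main (lines : List String) : ∀ (p : String) (d : PySem.Dict String String)
    (t ls : Option String),
    (t = some ((pvSplit p " --> ").headD "") ∨ PySem.Str.isIn "-->" p = false) →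
    (((p :: lines).zip lines).foldl pvBStep (d, ls)).1
      = (lines.foldl pvAStep (d, PySem.Str.isIn "-->" p, t, ls)).1 := by
  induction lines with
  | nil => intro p d t ls _; rfl
  | cons l r ih =>
    intro p d t ls ht
    rw [show ((p :: l :: r).zip (l :: r)) = (p, l) :: ((l :: r).zip r) from rfl,
        List.foldl_cons, List.foldl_cons]
    cases hl : PySem.Str.isIn "-->" l with
    | true =>
      -- cur is a timing line: B skips the pair, A enters the first branch
      have hb : pvBStep (d, ls) (p, l) = (d, ls) := by
        simp only [pvBStep, hl]; simp
      have ha : pvAStep (d, PySem.Str.isIn "-->" p, t, ls) l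
          = (d, true, some ((pvSplit l " --> ").headD ""), ls) := by
        simp only [pvAStep, hl]; simp
      rw [hb, ha]
      have hm := ih l d (some ((pvSplit l " --> ").headD "")) ls (Or.inl rfl)
      rw [hl] at hm
      exact hm
    | false =>
      cases hp : PySem.Str.isIn "-->" p with
      | true =>
        -- prev was a timing line, cur is text: both may save cur under prev's timing
        have htv : t = some ((pvSplit p " --> ").headD "") := by
          rcases ht with h | h
          · exact h
          · rw [hp] at h; cases h
        by_cases hls : ls = some l
        · have hb : pvBStep (d, ls) (p, l) = (d, ls) := by
            simp only [pvBStep, hp, hl]; simp [hls]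
          have ha : pvAStep (d, true, t, ls) l = (d, false, t, ls) := by
            simp only [pvAStep, hl]; simp [hls]
          rw [hb, ha]
          have hm := ih l d t ls (Or.inr hl)
          rw [hl] at hm
          exact hm
        · have hb : pvBStep (d, ls) (p, l)
              = (d.insert ((pvSplit p " --> ").headD "") l, some l) := by
            simp only [pvBStep, hp, hl]; simp [hls]
          have ha : pvAStep (d, true, t, ls) l
              = (d.insert ((pvSplit p " --> ").headD "") l, false, t, some l) := by
            simp only [pvAStep, hl, htv]; simp [hls]
          rw [hb, ha]
          have hm := ih l (d.insert ((pvSplit p " --> ").headD "") l) t (some l) (Or.inr hl)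
          rw [hl] at hm
          exact hm
      | false =>
        -- neither line is a timing line: both skip
        have hb : pvBStep (d, ls) (p, l) = (d, ls) := by
          simp only [pvBStep, hp, hl]; simp
        have ha : pvAStep (d, false, t, ls) l = (d, false, t, ls) := by
          simp only [pvAStep, hl]; simp
        rw [hb, ha]
        have hm := ih l d t ls (Or.inr hl)
        rw [hl] at hm
        exact hm

-- ===== VERDICT (by name: the statement is the Claim_ definition above) =====
theorem parse_subtitles_py_spec : Claim_equal_parse_subtitles_py := by
  intro subtitles _
  unfold Spec_parse_subtitles_py parse_subtitles_py parse_subtitles_py_alt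
  cases h : pvSplit subtitles "\n" with
  | nil => simp
  | cons p rest =>
    simp only [List.tail_cons, List.foldl_cons]
    cases hp : PySem.Str.isIn "-->" p with
    | true =>
      have ha : pvAStep (PySem.Dict.empty, false, none, none) p
          = (PySem.Dict.empty, true, some ((pvSplit p " --> ").headD ""), none) := by
        simp only [pvAStep, hp]; simp
      have hm := pv_main rest p PySem.Dict.empty
        (some ((pvSplit p " --> ").headD "")) none (Or.inl rfl)
      rw [hp] at hm
      rw [ha, ← hm]
    | false =>
      have ha : pvAStep (PySem.Dict.empty, false, none, none) p
          = (PySem.Dict.empty, false, none, none) := by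
        simp only [pvAStep, hp]; simp
      have hm := pv_main rest p PySem.Dict.empty none none (Or.inr hp)
      rw [hp] at hm
      rw [ha, ← hm]
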